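-- pv_equiv track=rewrite | github.com/MrBrantCode/unitest_baseline | mut_generate/mist_train_cf/cf_21637/solution.py | construct_nth_palindrome
-- ===== SOURCE A (Python) =====
-- import string
--
-- def construct_nth_palindrome(input_string, N):
--     if N < 1:
--         return ""
--
--     result = ""
--     count = 0
--
--     for upper in string.ascii_uppercase:
--         for lower in string.ascii_lowercase:
--             for special in string.punctuation:
--                 palindrome = special + lower + upper + lower + special
--                 if any(char.isupper() for char in palindrome) and \
--                    any(char.islower() for char in palindrome) and \
--                    any(char in string.punctuation for char in palindrome) and \
--                    not any(char.isdigit() for char in palindrome) and \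
--                    not any(char.isspace() for char in palindrome):
--                     count += 1
--                     if count == N:
--                         result = palindrome
--                         break
--             if count == N:
--                 break
--         if count == N:
--             break
--
--     return result
-- ===== SOURCE B (Python) =====
-- import string
--
-- def construct_nth_palindrome(input_string, N):
--     total = 26 * 26 * len(string.punctuation)
--     if N < 1 or N > total:
--         return ""
--     n = N - 1
--     upper, rem = divmod(n, 26 * len(string.punctuation))
--     lower, special = divmod(rem, len(string.punctuation))
--     return (string.punctuation[special] + string.ascii_lowercase[lower]
--             + string.ascii_uppercase[upper] + string.ascii_lowercase[lower]
--             + string.punctuation[special])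
-- ===== Notes on version B (the rewrite author's own statement) =====
-- stated objective: faster
-- what changed: Replaces the triple nested scan over all 26*26*32 character combinations (the filter always passes) by a direct O(1) decomposition of N-1 via divmod into upper/lower/special indices, with a single range check for the out-of-range empty-string cases.
import Mathlib
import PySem

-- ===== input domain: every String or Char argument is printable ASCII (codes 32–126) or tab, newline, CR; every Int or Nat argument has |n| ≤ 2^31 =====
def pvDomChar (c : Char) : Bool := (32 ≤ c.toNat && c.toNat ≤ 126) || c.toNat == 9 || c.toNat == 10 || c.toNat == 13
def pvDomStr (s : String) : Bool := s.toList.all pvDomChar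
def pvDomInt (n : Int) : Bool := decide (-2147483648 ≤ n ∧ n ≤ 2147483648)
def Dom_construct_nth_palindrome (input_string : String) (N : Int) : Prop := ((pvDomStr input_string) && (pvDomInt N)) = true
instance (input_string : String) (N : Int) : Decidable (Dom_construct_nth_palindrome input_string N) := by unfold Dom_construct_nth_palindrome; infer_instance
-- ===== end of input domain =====

-- B replaces A's triple nested scan over all 26*26*32 combinations by an O(1) divmod
-- index decomposition of N-1 (objective: faster, asymptotic).
-- Note: A ignores input_string entirely; both ports keep the parameter.

-- ===== PORT A =====
-- string.ascii_uppercase / ascii_lowercase / punctuation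
def pvUpperL : List Char := "ABCDEFGHIJKLMNOPQRSTUVWXYZ".toList
def pvLowerL : List Char := "abcdefghijklmnopqrstuvwxyz".toList
def pvPunctL : List Char := "!\"#$%&'()*+,-./:;<=>?@[\\]^_`{|}~".toList

-- the filter in A's inner loop, transliterated
def pvCond (p : List Char) : Bool :=
  (p.any PySem.Chars.isupper) &&
  (p.any PySem.Chars.islower) &&
  (p.any (fun c => pvPunctL.contains c)) &&
  !(p.any PySem.Chars.isdigit) &&
  !(p.any PySem.Chars.isspace)

-- innermost 'for special in string.punctuation' loop, with its break
def pvInner (N : Int) (u l : Char) (res : List Char) (count : Int) : List Char → List Char × Int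
  | [] => (res, count)
  | s :: rest =>
    let pal := [s, l, u, l, s]
    if pvCond pal then
      if count + 1 = N then (pal, count + 1)
      else pvInner N u l res (count + 1) rest
    else pvInner N u l res count rest

-- 'for lower in string.ascii_lowercase' loop, with its break
def pvMid (N : Int) (u : Char) (res : List Char) (count : Int) : List Char → List Char × Int
  | [] => (res, count)
  | l :: rest =>
    let rc := pvInner N u l res count pvPunctL
    if rc.2 = N then rc else pvMid N u rc.1 rc.2 rest

-- 'for upper in string.ascii_uppercase' loop, with its break
def pvOuter (N : Int) (res : List Char) (count : Int) : List Char → List Char × Int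
  | [] => (res, count)
  | u :: rest =>
    let rc := pvMid N u res count pvLowerL
    if rc.2 = N then rc else pvOuter N rc.1 rc.2 rest

def construct_nth_palindrome (input_string : String) (N : Int) : String :=
  if N < 1 then "" else String.mk (pvOuter N [] 0 pvUpperL).1

-- ===== PORT B =====
def construct_nth_palindrome_alt (input_string : String) (N : Int) : String :=
  if 1 ≤ N ∧ N ≤ 21632 then
    let n := N - 1
    let upper := PySem.Int.floordiv n 832
    let rem := PySem.Int.mod n 832
    let lower := PySem.Int.floordiv rem 32
    let special := PySem.Int.mod rem 32
    String.mk [PySem.List.pyGetD pvPunctL special ' ',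
               PySem.List.pyGetD pvLowerL lower ' ',
               PySem.List.pyGetD pvUpperL upper ' ',
               PySem.List.pyGetD pvLowerL lower ' ',
               PySem.List.pyGetD pvPunctL special ' ']
  else ""

-- ===== PRECONDITION & SPEC =====
def Spec_construct_nth_palindrome (input_string : String) (N : Int) (out : String) : Prop := out = construct_nth_palindrome_alt input_string N
instance (input_string : String) (N : Int) (out : String) : Decidable (Spec_construct_nth_palindrome input_string N out) := by unfold Spec_construct_nth_palindrome; infer_instance

-- ===== CLAIM (what is proved, stated in full; the proofs are below) =====
def Claim_equal_construct_nth_palindrome : Prop := ∀ (input_string : String) (N : Int), Dom_construct_nth_palindrome input_string N → Spec_construct_nth_palindrome input_string N (construct_nth_palindrome input_string N)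

-- ===== LEMMAS AND PROOFS =====

theorem pvUpper_all : pvUpperL.all
    (fun u => PySem.Chars.isupper u && !PySem.Chars.isdigit u && !PySem.Chars.isspace u) = true := by decide

theorem pvUpper_facts : ∀ u ∈ pvUpperL, PySem.Chars.isupper u = true ∧
    PySem.Chars.isdigit u = false ∧ PySem.Chars.isspace u = false := by
  intro u hu
  have h := List.all_eq_true.mp pvUpper_all u hu
  simp at h
  exact ⟨h.1.1, h.1.2, h.2⟩

theorem pvLower_all : pvLowerL.all
    (fun l => PySem.Chars.islower l && !PySem.Chars.isdigit l && !PySem.Chars.isspace l) = true := by decide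

theorem pvLower_facts : ∀ l ∈ pvLowerL, PySem.Chars.islower l = true ∧
    PySem.Chars.isdigit l = false ∧ PySem.Chars.isspace l = false := by
  intro l hl
  have h := List.all_eq_true.mp pvLower_all l hl
  simp at h
  exact ⟨h.1.1, h.1.2, h.2⟩

theorem pvPunct_all : pvPunctL.all
    (fun s => pvPunctL.contains s && !PySem.Chars.isdigit s && !PySem.Chars.isspace s) = true := by decide

theorem pvPunct_facts : ∀ s ∈ pvPunctL, pvPunctL.contains s = true ∧
    PySem.Chars.isdigit s = false ∧ PySem.Chars.isspace s = false := by
  intro s hs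
  have h := List.all_eq_true.mp pvPunct_all s hs
  simp at h
  exact ⟨by simpa using h.1.1, h.1.2, h.2⟩

theorem pvCond_true {u l s : Char} (hu : u ∈ pvUpperL) (hl : l ∈ pvLowerL)
    (hs : s ∈ pvPunctL) : pvCond [s, l, u, l, s] = true := by
  obtain ⟨hu1, hu2, hu3⟩ := pvUpper_facts u hu
  obtain ⟨hl1, hl2, hl3⟩ := pvLower_facts l hl
  obtain ⟨hs1, hs2, hs3⟩ := pvPunct_facts s hs
  simp [pvCond, hu1, hu2, hu3, hl1, hl2, hl3, hs2, hs3]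
  exact Or.inl hs

theorem pvInner_spec (u l : Char) (ps : List Char)
    (hc : ∀ s ∈ ps, pvCond [s, l, u, l, s] = true) :
    ∀ (count : Int) (res : List Char) (N : Int), count < N →
    pvInner N u l res count ps =
      if N ≤ count + ps.length then
        ([ps.getD (N - 1 - count).toNat ' ', l, u, l, ps.getD (N - 1 - count).toNat ' '], N)
      else (res, count + ps.length) := by
  induction ps with
  | nil =>
    intro count res N hlt
    rw [pvInner, if_neg (show ¬ N ≤ count + (([] : List Char).length : Int) by simp; omega)]
    simp
  | cons s rest ih =>
    intro count res N hlt
    have hcs : pvCond [s, l, u, l, s] = true := hc s (by simp)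
    rw [pvInner]
    simp only [hcs, if_true]
    by_cases h1 : count + 1 = N
    · have hk : (N - 1 - count).toNat = 0 := by omega
      rw [if_pos h1,
        if_pos (show N ≤ count + ((s :: rest).length : Int) by simp; omega)]
      simp [hk, h1]
    · rw [if_neg h1]
      rw [ih (fun x hx => hc x (by simp [hx])) (count + 1) res N (by omega)]
      have hk : (N - 1 - count).toNat = (N - 1 - (count + 1)).toNat + 1 := by omega
      by_cases h2 : N ≤ count + 1 + (rest.length : Int)
      · rw [if_pos h2,
          if_pos (show N ≤ count + ((s :: rest).length : Int) by simp; omega)]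
        simp [hk]
      · rw [if_neg h2,
          if_neg (show ¬ N ≤ count + ((s :: rest).length : Int) by simp; omega)]
        simp; omega

theorem pvPunctL_len : (pvPunctL.length : Int) = 32 := by decide
theorem pvLowerL_len : (pvLowerL.length : Int) = 26 := by decide

theorem pvMid_spec (u : Char) (ls : List Char)
    (hls : ∀ l ∈ ls, l ∈ pvLowerL) (hu : u ∈ pvUpperL) :
    ∀ (count : Int) (res : List Char) (N : Int), count < N →
    pvMid N u res count ls =
      if N ≤ count + 32 * ls.length then
        ([pvPunctL.getD ((N - 1 - count).toNat % 32) ' ',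
          ls.getD ((N - 1 - count).toNat / 32) ' ', u,
          ls.getD ((N - 1 - count).toNat / 32) ' ',
          pvPunctL.getD ((N - 1 - count).toNat % 32) ' '], N)
      else (res, count + 32 * ls.length) := by
  induction ls with
  | nil =>
    intro count res N hlt
    rw [pvMid, if_neg (show ¬ N ≤ count + 32 * (([] : List Char).length : Int) by simp; omega)]
    simp
  | cons l rest ih =>
    intro count res N hlt
    have hl : l ∈ pvLowerL := hls l (by simp)
    rw [pvMid,
      pvInner_spec u l pvPunctL (fun s hs => pvCond_true hu hl hs) count res N hlt,
      pvPunctL_len]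
    by_cases h1 : N ≤ count + 32
    · rw [if_pos h1]
      rw [if_pos (show N ≤ count + 32 * ((l :: rest).length : Int) by simp; omega)]
      have hd : (N - 1 - count).toNat / 32 = 0 := by omega
      have hm : (N - 1 - count).toNat % 32 = (N - 1 - count).toNat := by omega
      simp [hd, hm]
    · rw [if_neg h1]
      have hne : ¬ (count + 32 = N) := by omega
      simp only [hne, if_false]
      rw [ih (fun x hx => hls x (by simp [hx])) (count + 32) res N (by omega)]
      have hd : (N - 1 - count).toNat / 32 = (N - 1 - (count + 32)).toNat / 32 + 1 := by omega
      have hm : (N - 1 - count).toNat % 32 = (N - 1 - (count + 32)).toNat % 32 := by omega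
      by_cases h2 : N ≤ count + 32 + 32 * (rest.length : Int)
      · rw [if_pos h2,
          if_pos (show N ≤ count + 32 * ((l :: rest).length : Int) by simp; omega)]
        simp [hd, hm]
      · rw [if_neg h2,
          if_neg (show ¬ N ≤ count + 32 * ((l :: rest).length : Int) by simp; omega)]
        simp; omega

theorem pvOuter_spec (us : List Char) (hus : ∀ u ∈ us, u ∈ pvUpperL) :
    ∀ (count : Int) (res : List Char) (N : Int), count < N →
    pvOuter N res count us =
      if N ≤ count + 832 * us.length then
        ([pvPunctL.getD ((N - 1 - count).toNat % 32) ' ',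
          pvLowerL.getD ((N - 1 - count).toNat % 832 / 32) ' ',
          us.getD ((N - 1 - count).toNat / 832) ' ',
          pvLowerL.getD ((N - 1 - count).toNat % 832 / 32) ' ',
          pvPunctL.getD ((N - 1 - count).toNat % 32) ' '], N)
      else (res, count + 832 * us.length) := by
  induction us with
  | nil =>
    intro count res N hlt
    rw [pvOuter, if_neg (show ¬ N ≤ count + 832 * (([] : List Char).length : Int) by simp; omega)]
    simp
  | cons u rest ih =>
    intro count res N hlt
    have hu : u ∈ pvUpperL := hus u (by simp)
    rw [pvOuter, pvMid_spec u pvLowerL (fun l hl => hl) hu count res N hlt,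
      pvLowerL_len]
    by_cases h1 : N ≤ count + 32 * 26
    · rw [if_pos h1]
      rw [if_pos (show N ≤ count + 832 * ((u :: rest).length : Int) by simp; omega)]
      have hd : (N - 1 - count).toNat / 832 = 0 := by omega
      have hm : (N - 1 - count).toNat % 832 = (N - 1 - count).toNat := by omega
      simp [hd, hm]
    · rw [if_neg h1]
      have hne : ¬ (count + 32 * 26 = N) := by omega
      simp only [hne, if_false]
      rw [ih (fun x hx => hus x (by simp [hx])) (count + 32 * 26) res N (by omega)]
      have hd : (N - 1 - count).toNat / 832 = (N - 1 - (count + 32 * 26)).toNat / 832 + 1 := by omega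
      have hm8 : (N - 1 - count).toNat % 832 = (N - 1 - (count + 32 * 26)).toNat % 832 := by omega
      have hm3 : (N - 1 - count).toNat % 32 = (N - 1 - (count + 32 * 26)).toNat % 32 := by omega
      by_cases h2 : N ≤ count + 32 * 26 + 832 * (rest.length : Int)
      · rw [if_pos h2,
          if_pos (show N ≤ count + 832 * ((u :: rest).length : Int) by simp; omega)]
        simp [hd, hm8, hm3]
      · rw [if_neg h2,
          if_neg (show ¬ N ≤ count + 832 * ((u :: rest).length : Int) by simp; omega)]
        simp; omega

-- ===== VERDICT (by name: the statement is the Claim_ definition above) =====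
theorem construct_nth_palindrome_spec : Claim_equal_construct_nth_palindrome := by
  intro input_string N _
  unfold Spec_construct_nth_palindrome construct_nth_palindrome construct_nth_palindrome_alt
  by_cases h0 : N < 1
  · rw [if_pos h0, if_neg (by omega)]
  · rw [if_neg h0, pvOuter_spec pvUpperL (fun u hu => hu) 0 [] N (by omega),
      show (pvUpperL.length : Int) = 26 from by decide]
    by_cases h1 : N ≤ 0 + 832 * 26
    · rw [if_pos h1, if_pos (show 1 ≤ N ∧ N ≤ 21632 by omega)]
      set m : Nat := (N - 1 - 0).toNat with hm
      have hN1 : N - 1 = (m : Int) := by omega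
      have h1' : PySem.Int.floordiv (N - 1) 832 = ((m / 832 : Nat) : Int) := by
        rw [hN1]; exact_mod_cast PySem.Int.floordiv_natCast m 832
      have h2' : PySem.Int.mod (N - 1) 832 = ((m % 832 : Nat) : Int) := by
        rw [hN1]; exact_mod_cast PySem.Int.mod_natCast m 832
      have h3' : PySem.Int.floordiv ((m % 832 : Nat) : Int) 32 = ((m % 832 / 32 : Nat) : Int) := by
        exact_mod_cast PySem.Int.floordiv_natCast (m % 832) 32
      have h4' : PySem.Int.mod ((m % 832 : Nat) : Int) 32 = ((m % 832 % 32 : Nat) : Int) := by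
        exact_mod_cast PySem.Int.mod_natCast (m % 832) 32
      simp only [h1', h2', h3', h4', PySem.List.pyGetD_natCast]
      have hmm : m % 832 % 32 = m % 32 := Nat.mod_mod_of_dvd m (by norm_num)
      rw [hmm]
    · rw [if_neg h1, if_neg (by omega)]
      decide
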